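-- pv_equiv track=rewrite | github.com/Blycco/TrendScope | backend/api/middleware/quota.py | _get_quota_limit
-- ===== SOURCE A (Python) =====
-- _QUOTA_TABLE: list[tuple[str, int, int | None]] = [
--     # path_prefix, max_plan_level_inclusive, limit
--     # /api/v1/trends — free: 10/day, pro+: unlimited
--     ("/api/v1/trends", 0, 10),
--     ("/api/v1/trends", 1, None),
--     ("/api/v1/trends", 2, None),
--     ("/api/v1/trends", 3, None),
--     # /api/v1/scraps — free: 50 total (tracked as daily for simplicity), pro+: unlimited
--     ("/api/v1/scraps", 0, 50),
--     ("/api/v1/scraps", 1, None),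
--     ("/api/v1/scraps", 2, None),
--     ("/api/v1/scraps", 3, None),
--     # /api/v1/content/ideas — free: blocked, pro: 5/day, business+: unlimited
--     ("/api/v1/content/ideas", 0, -1),
--     ("/api/v1/content/ideas", 1, 5),
--     ("/api/v1/content/ideas", 2, None),
--     ("/api/v1/content/ideas", 3, None),
-- ]
--
-- _QUOTA_TYPE_MAP: dict[str, str] = {
--     "/api/v1/trends": "daily_trends",
--     "/api/v1/scraps": "daily_scraps",
--     "/api/v1/content/ideas": "daily_content_ideas",
-- }
--
-- def _get_quota_limit(path: str, plan_level: int) -> tuple[str | None, int | None]: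
--     """Return (quota_type, limit) for the given path and plan level.
--
--     limit=None means unlimited; limit=-1 means fully blocked.
--     Returns (None, None) if this path is not quota-gated.
--     """
--     matched_prefix: str | None = None
--     for prefix, level, limit in _QUOTA_TABLE:
--         if path.startswith(prefix):
--             matched_prefix = prefix
--             if level == plan_level:
--                 quota_type = _QUOTA_TYPE_MAP.get(prefix, prefix)
--                 return quota_type, limit
--
--     if matched_prefix is None:
--         return None, None
--
--     # fallback: unlimited for unmatched levels above table
--     quota_type = _QUOTA_TYPE_MAP.get(matched_prefix, matched_prefix)
--     return quota_type, None
-- ===== SOURCE B (Python) =====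
-- _QUOTA_MAP: dict[str, tuple[str, dict[int, int | None]]] = {
--     "/api/v1/trends": ("daily_trends", {0: 10, 1: None, 2: None, 3: None}),
--     "/api/v1/scraps": ("daily_scraps", {0: 50, 1: None, 2: None, 3: None}),
--     "/api/v1/content/ideas": ("daily_content_ideas", {0: -1, 1: 5, 2: None, 3: None}),
-- }
--
-- def _get_quota_limit(path: str, plan_level: int) -> tuple[str | None, int | None]:
--     """Return (quota_type, limit) for the given path and plan level."""
--     for prefix, (quota_type, levels) in _QUOTA_MAP.items():
--         if path.startswith(prefix):
--             # .get yields None for levels outside the table = unlimited fallback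
--             return quota_type, levels.get(plan_level)
--     return None, None
-- ===== Notes on version B (the rewrite author's own statement) =====
-- stated objective: simpler
-- what changed: Replaces the 12-row flat table scan with dual conditions and a matched_prefix fallback by a 3-entry nested mapping prefix -> (quota_type, {level: limit}): one prefix search, then a direct per-level lookup whose missing-key None doubles as the unlimited fallback.
import Mathlib
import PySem

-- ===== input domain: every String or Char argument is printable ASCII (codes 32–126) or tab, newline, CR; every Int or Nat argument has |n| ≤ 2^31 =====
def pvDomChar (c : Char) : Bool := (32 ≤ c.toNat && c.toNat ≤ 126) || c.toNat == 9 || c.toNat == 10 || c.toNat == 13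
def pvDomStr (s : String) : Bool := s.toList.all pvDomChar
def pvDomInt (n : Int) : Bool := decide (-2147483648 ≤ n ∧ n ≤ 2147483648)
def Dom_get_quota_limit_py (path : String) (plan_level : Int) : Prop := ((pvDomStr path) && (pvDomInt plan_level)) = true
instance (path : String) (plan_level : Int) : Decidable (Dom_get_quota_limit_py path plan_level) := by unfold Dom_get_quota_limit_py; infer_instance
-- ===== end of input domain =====

-- B replaces the 12-row flat scan with a 3-entry nested map (prefix -> quota_type, per-level dict); objective: simpler.

-- ===== PORT A =====
def pvQuotaTable : List (String × Int × Option Int) :=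
  [("/api/v1/trends", 0, some 10),
   ("/api/v1/trends", 1, none),
   ("/api/v1/trends", 2, none),
   ("/api/v1/trends", 3, none),
   ("/api/v1/scraps", 0, some 50),
   ("/api/v1/scraps", 1, none),
   ("/api/v1/scraps", 2, none),
   ("/api/v1/scraps", 3, none),
   ("/api/v1/content/ideas", 0, some (-1)),
   ("/api/v1/content/ideas", 1, some 5),
   ("/api/v1/content/ideas", 2, none),
   ("/api/v1/content/ideas", 3, none)]

def pvQuotaTypeMap : PySem.Dict String String :=
  PySem.Dict.ofList
    [("/api/v1/trends", "daily_trends"),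
     ("/api/v1/scraps", "daily_scraps"),
     ("/api/v1/content/ideas", "daily_content_ideas")]

-- the for-loop with its early return and the matched_prefix accumulator
def pvALoop (path : String) (plan_level : Int) :
    List (String × Int × Option Int) → Option String → Option String × Option Int
  | [], matched =>
      match matched with
      | none => (none, none)
      | some m => (some (PySem.Dict.getD pvQuotaTypeMap m m), none)
  | (pre, level, limit) :: rest, matched =>
      if PySem.Str.startswith path pre then
        if level == plan_level then
          (some (PySem.Dict.getD pvQuotaTypeMap pre pre), limit)
        else pvALoop path plan_level rest (some pre)
      else pvALoop path plan_level rest matched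

def get_quota_limit_py (path : String) (plan_level : Int) : Option String × Option Int :=
  pvALoop path plan_level pvQuotaTable none

-- ===== PORT B =====
def pvQuotaMap : List (String × String × PySem.Dict Int (Option Int)) :=
  [("/api/v1/trends", "daily_trends",
      PySem.Dict.ofList [(0, some 10), (1, none), (2, none), (3, none)]),
   ("/api/v1/scraps", "daily_scraps",
      PySem.Dict.ofList [(0, some 50), (1, none), (2, none), (3, none)]),
   ("/api/v1/content/ideas", "daily_content_ideas",
      PySem.Dict.ofList [(0, some (-1)), (1, some 5), (2, none), (3, none)])]

def pvBLoop (path : String) (plan_level : Int) :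
    List (String × String × PySem.Dict Int (Option Int)) → Option String × Option Int
  | [] => (none, none)
  | (pre, quota_type, levels) :: rest =>
      if PySem.Str.startswith path pre then
        (some quota_type, PySem.Dict.getD levels plan_level none)
      else pvBLoop path plan_level rest

def get_quota_limit_py_alt (path : String) (plan_level : Int) : Option String × Option Int :=
  pvBLoop path plan_level pvQuotaMap

-- ===== PRECONDITION & SPEC =====
def Spec_get_quota_limit_py (path : String) (plan_level : Int) (out : Option String × Option Int) : Prop := out = get_quota_limit_py_alt path plan_level
instance (path : String) (plan_level : Int) (out : Option String × Option Int) : Decidable (Spec_get_quota_limit_py path plan_level out) := by unfold Spec_get_quota_limit_py; infer_instance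

-- ===== CLAIM (what is proved, stated in full; the proofs are below) =====
def Claim_equal_get_quota_limit_py : Prop := ∀ (path : String) (plan_level : Int), Dom_get_quota_limit_py path plan_level → Spec_get_quota_limit_py path plan_level (get_quota_limit_py path plan_level)

-- ===== LEMMAS AND PROOFS =====

-- evaluating B's per-prefix level dict as nested ifs (keys 0..3, default none)
theorem pv_dict_eval (a b c d : Option Int) (lv : Int) :
    PySem.Dict.getD (PySem.Dict.ofList [((0 : Int), a), (1, b), (2, c), (3, d)]) lv none =
      if (0 : Int) = lv then a else if (1 : Int) = lv then b
      else if (2 : Int) = lv then c else if (3 : Int) = lv then d else none := by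
  by_cases g0 : (0 : Int) = lv
  · subst g0; rfl
  by_cases g1 : (1 : Int) = lv
  · subst g1; rfl
  by_cases g2 : (2 : Int) = lv
  · subst g2; rfl
  by_cases g3 : (3 : Int) = lv
  · subst g3; rfl
  have e0 : ((0 : Int) == lv) = false := by simp [g0]
  have e1 : ((1 : Int) == lv) = false := by simp [g1]
  have e2 : ((2 : Int) == lv) = false := by simp [g2]
  have e3 : ((3 : Int) == lv) = false := by simp [g3]
  simp [PySem.Dict.getD, PySem.Dict.get?, PySem.Dict.ofList, PySem.Dict.update,
    PySem.Dict.empty, PySem.Dict.insert, PySem.Dict.contains, List.find?, e0, e1, e2, e3, g0, g1, g2, g3]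

-- the three quota-type lookups of A evaluate to their names
theorem pv_qt1 : PySem.Dict.getD pvQuotaTypeMap "/api/v1/trends" "/api/v1/trends" = "daily_trends" := by decide
theorem pv_qt2 : PySem.Dict.getD pvQuotaTypeMap "/api/v1/scraps" "/api/v1/scraps" = "daily_scraps" := by decide
theorem pv_qt3 : PySem.Dict.getD pvQuotaTypeMap "/api/v1/content/ideas" "/api/v1/content/ideas" = "daily_content_ideas" := by decide

-- no path starts with two distinct table prefixes (they disagree at character 8)
theorem pv_prefix_excl (path : String) (p q : List Char)
    (hp : PySem.Chars.startswith path.toList p = true)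
    (hq : PySem.Chars.startswith path.toList q = true)
    (hne : p[8]? ≠ q[8]?) (h8p : 8 < p.length) (h8q : 8 < q.length) : False := by
  obtain ⟨tp, ep⟩ := (PySem.Chars.startswith_iff _ _).mp hp
  obtain ⟨tq, eq⟩ := (PySem.Chars.startswith_iff _ _).mp hq
  have h2 : (p ++ tp)[8]? = (q ++ tq)[8]? := by rw [ep, eq]
  rw [List.getElem?_append_left h8p, List.getElem?_append_left h8q] at h2
  exact hne h2

theorem pv_not12 (path : String)
    (h1 : PySem.Str.startswith path "/api/v1/trends" = true)
    (h2 : PySem.Str.startswith path "/api/v1/scraps" = true) : False := by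
  rw [PySem.Str.startswith_eq] at h1 h2
  exact pv_prefix_excl path _ _ h1 h2 (by decide) (by decide) (by decide)

theorem pv_not13 (path : String)
    (h1 : PySem.Str.startswith path "/api/v1/trends" = true)
    (h3 : PySem.Str.startswith path "/api/v1/content/ideas" = true) : False := by
  rw [PySem.Str.startswith_eq] at h1 h3
  exact pv_prefix_excl path _ _ h1 h3 (by decide) (by decide) (by decide)

theorem pv_not23 (path : String)
    (h2 : PySem.Str.startswith path "/api/v1/scraps" = true)
    (h3 : PySem.Str.startswith path "/api/v1/content/ideas" = true) : False := by
  rw [PySem.Str.startswith_eq] at h2 h3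
  exact pv_prefix_excl path _ _ h2 h3 (by decide) (by decide) (by decide)

-- one-row unfolding lemmas for the two loops (keep simp from exponential unfolding)
theorem pvALoop_cons_false {path : String} {plan : Int} {pre : String} {level : Int}
    {limit : Option Int} {rest : List (String × Int × Option Int)} {matched : Option String}
    (h : PySem.Str.startswith path pre = false) :
    pvALoop path plan ((pre, level, limit) :: rest) matched = pvALoop path plan rest matched := by
  rw [PySem.Str.startswith_eq] at h
  simp [pvALoop, h]

theorem pvALoop_cons_true {path : String} {plan : Int} {pre : String} {level : Int}
    {limit : Option Int} {rest : List (String × Int × Option Int)} {matched : Option String}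
    (h : PySem.Str.startswith path pre = true) :
    pvALoop path plan ((pre, level, limit) :: rest) matched =
      if level = plan then (some (PySem.Dict.getD pvQuotaTypeMap pre pre), limit)
      else pvALoop path plan rest (some pre) := by
  rw [PySem.Str.startswith_eq] at h
  simp [pvALoop, h, beq_iff_eq]

theorem pvALoop_nil_none {path : String} {plan : Int} :
    pvALoop path plan [] none = (none, none) := rfl

theorem pvALoop_nil_some {path : String} {plan : Int} {m : String} :
    pvALoop path plan [] (some m) = (some (PySem.Dict.getD pvQuotaTypeMap m m), none) := rfl

theorem pvBLoop_cons_false {path : String} {plan : Int} {pre quota_type : String}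
    {levels : PySem.Dict Int (Option Int)} {rest : List (String × String × PySem.Dict Int (Option Int))}
    (h : PySem.Str.startswith path pre = false) :
    pvBLoop path plan ((pre, quota_type, levels) :: rest) = pvBLoop path plan rest := by
  rw [PySem.Str.startswith_eq] at h
  simp [pvBLoop, h]

theorem pvBLoop_cons_true {path : String} {plan : Int} {pre quota_type : String}
    {levels : PySem.Dict Int (Option Int)} {rest : List (String × String × PySem.Dict Int (Option Int))}
    (h : PySem.Str.startswith path pre = true) :
    pvBLoop path plan ((pre, quota_type, levels) :: rest) =
      (some quota_type, PySem.Dict.getD levels plan none) := by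
  rw [PySem.Str.startswith_eq] at h
  simp [pvBLoop, h]

theorem pvBLoop_nil {path : String} {plan : Int} : pvBLoop path plan [] = (none, none) := rfl

set_option maxHeartbeats 1000000 in
theorem pv_eq (path : String) (plan_level : Int) :
    get_quota_limit_py path plan_level = get_quota_limit_py_alt path plan_level := by
  unfold get_quota_limit_py get_quota_limit_py_alt pvQuotaTable pvQuotaMap
  cases e1 : PySem.Str.startswith path "/api/v1/trends" <;>
  cases e2 : PySem.Str.startswith path "/api/v1/scraps" <;>
  cases e3 : PySem.Str.startswith path "/api/v1/content/ideas" <;>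
  first
    | exact (pv_not12 path e1 e2).elim
    | exact (pv_not13 path e1 e3).elim
    | exact (pv_not23 path e2 e3).elim
    | (simp only [pvALoop_cons_false, pvALoop_cons_true, pvBLoop_cons_false,
        pvBLoop_cons_true, e1, e2, e3,
        pvALoop_nil_none, pvALoop_nil_some, pvBLoop_nil,
        pv_dict_eval, pv_qt1, pv_qt2, pv_qt3]
       all_goals first
         | rfl
         | (split_ifs <;> rfl))

-- ===== VERDICT (by name: the statement is the Claim_ definition above) =====
set_option maxHeartbeats 1000000 in
theorem get_quota_limit_py_spec : Claim_equal_get_quota_limit_py := by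
  intro path plan_level _
  unfold Spec_get_quota_limit_py
  exact pv_eq path plan_level
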